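-- pv_equiv track=rewrite | github.com/Maks1232/text_summarizator | gui_generic_ocr.py | calculate_occurrences_for_text
-- ===== SOURCE A (Python) =====
-- def calculate_occurrences_for_text(occurrences):
--     """
--     Function used to calculate word occurrences in whole text
--     :param occurrences: dictionary in which keys are sentences and values are dict with word counts in each sentence
--     :return: Dict with words and their number of occurrences in the whole text
--     """
--     word_in_text_dict = {}
--
--     for sent, word_n_count in occurrences.items():
--         for word, count in word_n_count.items():
--             if word not in word_in_text_dict:
--                 word_in_text_dict[word] = 1
--             else:
--                 word_in_text_dict[word] += 1
--
--     return word_in_text_dict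
-- ===== SOURCE B (Python) =====
-- def calculate_occurrences_for_text(occurrences):
--     """Flatten all inner-dict keys once, then build the counter as a
--     dedup-then-count comprehension instead of A's nested accumulation loop."""
--     words = [w for wc in occurrences.values() for w in wc]
--     return {w: words.count(w) for w in dict.fromkeys(words)}
-- ===== Notes on version B (the rewrite author's own statement) =====
-- stated objective: alternative
-- what changed: Replaces A's nested per-entry accumulation into a dict with a flatten-all-keys pass followed by a dedup-and-count comprehension (per distinct word, count it in the flattened key list).
import Mathlib
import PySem

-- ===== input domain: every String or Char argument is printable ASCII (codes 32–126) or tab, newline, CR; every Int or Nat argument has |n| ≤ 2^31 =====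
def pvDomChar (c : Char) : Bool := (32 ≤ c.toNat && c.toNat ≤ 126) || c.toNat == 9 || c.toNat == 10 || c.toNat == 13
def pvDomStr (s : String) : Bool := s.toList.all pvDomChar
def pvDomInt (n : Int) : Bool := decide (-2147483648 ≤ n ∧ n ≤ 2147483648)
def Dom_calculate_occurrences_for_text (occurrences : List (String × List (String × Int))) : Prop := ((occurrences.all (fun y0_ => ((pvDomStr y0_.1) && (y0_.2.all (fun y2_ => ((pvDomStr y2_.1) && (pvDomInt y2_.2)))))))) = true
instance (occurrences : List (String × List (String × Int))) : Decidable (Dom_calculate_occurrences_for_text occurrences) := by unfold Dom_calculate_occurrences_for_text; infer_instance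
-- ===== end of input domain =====

-- ===== PORT A =====
-- Nested loop over (sentence, word-count dict) entries, incrementing a dict per word seen.
def calculate_occurrences_for_text (occurrences : List (String × List (String × Int))) : List (String × Int) :=
  (occurrences.foldl (fun d sp =>
      sp.2.foldl (fun d p =>
        if d.contains p.1 = false then d.insert p.1 1
        else d.insert p.1 (d.getD p.1 0 + 1)) d)
    (PySem.Dict.empty : PySem.Dict String Int)).items

-- ===== PORT B =====
-- B: flatten all inner keys, then dedup (dict.fromkeys order) and count each word in the flat list.
def calculate_occurrences_for_text_alt (occurrences : List (String × List (String × Int))) : List (String × Int) :=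
  let words := occurrences.flatMap (fun sp => sp.2.map Prod.fst)
  (PySem.List.dedup words).map (fun w => (w, (words.count w : Int)))

-- ===== PRECONDITION & SPEC =====
def Spec_calculate_occurrences_for_text (occurrences : List (String × List (String × Int))) (out : List (String × Int)) : Prop := out = calculate_occurrences_for_text_alt occurrences
instance (occurrences : List (String × List (String × Int))) (out : List (String × Int)) : Decidable (Spec_calculate_occurrences_for_text occurrences out) := by unfold Spec_calculate_occurrences_for_text; infer_instance

-- ===== CLAIM (what is proved, stated in full; the proofs are below) =====
def Claim_equal_calculate_occurrences_for_text : Prop := ∀ (occurrences : List (String × List (String × Int))), Dom_calculate_occurrences_for_text occurrences → Spec_calculate_occurrences_for_text occurrences (calculate_occurrences_for_text occurrences)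

-- ===== LEMMAS AND PROOFS =====

-- ===== VERDICT (by name: the statement is the Claim_ definition above) =====
-- A's nested fold is the fold of the per-word step over the flattened key list.
theorem foldA_flat (occ : List (String × List (String × Int))) (d : PySem.Dict String Int) :
    occ.foldl (fun d sp =>
        sp.2.foldl (fun d p =>
          if d.contains p.1 = false then d.insert p.1 1
          else d.insert p.1 (d.getD p.1 0 + 1)) d) d
    = (occ.flatMap (fun sp => sp.2.map Prod.fst)).foldl
        (fun d w => if d.contains w = false then d.insert w 1
                    else d.insert w (d.getD w 0 + 1)) d := by
  induction occ generalizing d with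
  | nil => rfl
  | cons sp rest ih =>
      simp only [List.foldl_cons, List.flatMap_cons, List.foldl_append, List.foldl_map, ih]

-- A's step function equals the counter step (insert (getD+1)): when the key is absent, getD is 0.
theorem stepA_eq (d : PySem.Dict String Int) (w : String) :
    (if d.contains w = false then d.insert w 1 else d.insert w (d.getD w 0 + 1))
    = d.insert w (d.getD w 0 + 1) := by
  by_cases h : d.contains w = false
  · rw [PySem.Dict.getD_of_not_contains (h := h)]; simp [h]
  · simp [h]

theorem calculate_occurrences_for_text_spec : Claim_equal_calculate_occurrences_for_text := by
  intro occ _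
  show calculate_occurrences_for_text occ = calculate_occurrences_for_text_alt occ
  unfold calculate_occurrences_for_text calculate_occurrences_for_text_alt
  rw [foldA_flat]
  simp only [stepA_eq, PySem.Dict.foldl_insert_getD_add_one_eq_counter,
    PySem.Dict.items_counter, PySem.List.dedup_eq_ofList]
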